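-- pv_equiv track=rewrite | github.com/MarlinZapp/ave-caesar | generate-circular-course.py | get_next_segments
-- ===== SOURCE A (Python) =====
-- def get_next_segments(segment_types: list[str], track: int, num_tracks, segment: int, num_segments: int):
--     seg_type = segment_types[segment]
--     next_segment = (segment + 1) % num_segments
--     next_seg_type = segment_types[next_segment]
--     segments = []
--     # Additional caesar greeting segment track
--     if next_seg_type == "start-goal":
--         num_tracks = num_tracks + 1
--     for next_track in range(1, num_tracks + 1):
--         if next_seg_type == "bottleneck":
--             if next_track != 1:
--                 continue
--             # In bottleneck segments, only the first track exists
--             segments.append(f"segment-{next_track}-{next_segment}")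
--         elif next_seg_type == "wall-divided":
--             if seg_type == "wall-divided":
--                 # You must stay on this track in two consecutive wall-divided segments
--                 if track == next_track:
--                     segments.append(f"segment-{track}-{next_segment}")
--             elif abs(track - next_track) <= 1 or seg_type == "bottleneck":
--                 # You can only switch to adjacent tracks in a wall-divided segment except for when the current segment is a bottleneck
--                 segments.append(f"segment-{next_track}-{next_segment}")
--         else:
--             if seg_type == "wall-divided":
--                 if abs(track - next_track) <= 1:
--                     # After a wall-divided segment, you can only switch to adjacent tracks
--                     segments.append(f"segment-{next_track}-{next_segment}")
--             else:
--                 # By default, players can switch to any track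
--                 segments.append(f"segment-{next_track}-{next_segment}")
--     return segments
-- ===== SOURCE B (Python) =====
-- def get_next_segments(segment_types: list[str], track: int, num_tracks, segment: int, num_segments: int):
--     seg_type = segment_types[segment]
--     next_segment = (segment + 1) % num_segments
--     next_seg_type = segment_types[next_segment]
--     if next_seg_type == "bottleneck":
--         # Only track 1 exists in a bottleneck
--         return [f"segment-1-{next_segment}"] if num_tracks >= 1 else []
--     n = num_tracks + 1 if next_seg_type == "start-goal" else num_tracks
--     if next_seg_type == "wall-divided" and seg_type == "wall-divided":
--         # Must stay on this track across consecutive wall-divided segments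
--         return [f"segment-{track}-{next_segment}"] if 1 <= track <= n else []
--     if seg_type == "wall-divided" or (next_seg_type == "wall-divided" and seg_type != "bottleneck"):
--         lo, hi = max(1, track - 1), min(n, track + 1)   # adjacent tracks only
--     else:
--         lo, hi = 1, n                                   # any track
--     return [f"segment-{t}-{next_segment}" for t in range(lo, hi + 1)]
-- ===== Notes on version B (the rewrite author's own statement) =====
-- stated objective: simpler
-- what changed: B decides the movement rule once from seg_type/next_seg_type and emits a single arithmetic range of track numbers (singleton for bottleneck or consecutive wall-divided, clamped adjacent window, or the full range), replacing A's loop over every track with per-track membership tests.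
import Mathlib
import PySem

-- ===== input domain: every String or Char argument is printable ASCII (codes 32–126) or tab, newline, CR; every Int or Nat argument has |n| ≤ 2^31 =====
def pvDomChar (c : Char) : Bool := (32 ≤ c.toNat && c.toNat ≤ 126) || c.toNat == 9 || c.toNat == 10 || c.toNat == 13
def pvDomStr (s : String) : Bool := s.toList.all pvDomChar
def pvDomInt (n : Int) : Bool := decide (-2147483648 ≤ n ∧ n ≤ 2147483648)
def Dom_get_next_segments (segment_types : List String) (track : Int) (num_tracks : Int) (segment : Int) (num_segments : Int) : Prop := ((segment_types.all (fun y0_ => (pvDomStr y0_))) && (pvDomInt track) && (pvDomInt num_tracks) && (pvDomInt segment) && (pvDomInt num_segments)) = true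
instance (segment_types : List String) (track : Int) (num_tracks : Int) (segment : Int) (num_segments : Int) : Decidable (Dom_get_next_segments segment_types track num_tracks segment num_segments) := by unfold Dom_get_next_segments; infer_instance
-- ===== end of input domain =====

-- ===== PORT A =====
-- B decides the movement rule once (bottleneck / stay-on-track / adjacent window / full range)
-- and emits one arithmetic range, instead of A's full-track loop with per-track tests; objective: simpler.
def get_next_segments (segment_types : List String) (track : Int) (num_tracks : Int) (segment : Int) (num_segments : Int) : List String :=
  let seg_type := PySem.List.pyGetD segment_types segment ""
  let next_segment := PySem.Int.mod (segment + 1) num_segments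
  let next_seg_type := PySem.List.pyGetD segment_types next_segment ""
  let num_tracks2 := if next_seg_type = "start-goal" then num_tracks + 1 else num_tracks
  (PySem.List.pyRange 1 (num_tracks2 + 1) 1).foldl (fun segments next_track =>
    if next_seg_type = "bottleneck" then
      if next_track ≠ 1 then segments
      else segments ++ ["segment-" ++ PySem.Int.toStr next_track ++ "-" ++ PySem.Int.toStr next_segment]
    else if next_seg_type = "wall-divided" then
      if seg_type = "wall-divided" then
        if track = next_track then segments ++ ["segment-" ++ PySem.Int.toStr track ++ "-" ++ PySem.Int.toStr next_segment]
        else segments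
      else if |track - next_track| ≤ 1 ∨ seg_type = "bottleneck" then
        segments ++ ["segment-" ++ PySem.Int.toStr next_track ++ "-" ++ PySem.Int.toStr next_segment]
      else segments
    else
      if seg_type = "wall-divided" then
        if |track - next_track| ≤ 1 then
          segments ++ ["segment-" ++ PySem.Int.toStr next_track ++ "-" ++ PySem.Int.toStr next_segment]
        else segments
      else segments ++ ["segment-" ++ PySem.Int.toStr next_track ++ "-" ++ PySem.Int.toStr next_segment]) []

-- ===== PORT B =====
def get_next_segments_alt (segment_types : List String) (track : Int) (num_tracks : Int) (segment : Int) (num_segments : Int) : List String :=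
  let seg_type := PySem.List.pyGetD segment_types segment ""
  let next_segment := PySem.Int.mod (segment + 1) num_segments
  let next_seg_type := PySem.List.pyGetD segment_types next_segment ""
  if next_seg_type = "bottleneck" then
    -- Only track 1 exists in a bottleneck
    if num_tracks ≥ 1 then ["segment-1-" ++ PySem.Int.toStr next_segment] else []
  else
    let n := if next_seg_type = "start-goal" then num_tracks + 1 else num_tracks
    if next_seg_type = "wall-divided" ∧ seg_type = "wall-divided" then
      -- Must stay on this track across consecutive wall-divided segments
      if 1 ≤ track ∧ track ≤ n then
        ["segment-" ++ PySem.Int.toStr track ++ "-" ++ PySem.Int.toStr next_segment]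
      else []
    else
      let lohi :=
        if seg_type = "wall-divided" ∨ (next_seg_type = "wall-divided" ∧ ¬ seg_type = "bottleneck") then
          (max 1 (track - 1), min n (track + 1))   -- adjacent tracks only
        else (1, n)                                -- any track
      (PySem.List.pyRange lohi.1 (lohi.2 + 1) 1).map
        (fun t => "segment-" ++ PySem.Int.toStr t ++ "-" ++ PySem.Int.toStr next_segment)

-- ===== PRECONDITION & SPEC =====
-- Pre_ excludes exactly the inputs where Python A raises: num_segments = 0 (ZeroDivisionError)
-- or an out-of-range index into segment_types (IndexError).
def Pre_get_next_segments (segment_types : List String) (track : Int) (num_tracks : Int) (segment : Int) (num_segments : Int) : Prop :=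
  num_segments ≠ 0 ∧ PySem.Raise.InRange segment_types.length segment ∧
    PySem.Raise.InRange segment_types.length (PySem.Int.mod (segment + 1) num_segments)
instance (segment_types : List String) (track : Int) (num_tracks : Int) (segment : Int) (num_segments : Int) : Decidable (Pre_get_next_segments segment_types track num_tracks segment num_segments) := by unfold Pre_get_next_segments; infer_instance

def pvWitness_get_next_segments : List String × Int × Int × Int × Int :=
  (["start-goal", "wall-divided"], 1, 2, 0, 2)

def Spec_get_next_segments (segment_types : List String) (track : Int) (num_tracks : Int) (segment : Int) (num_segments : Int) (out : List String) : Prop := out = get_next_segments_alt segment_types track num_tracks segment num_segments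
instance (segment_types : List String) (track : Int) (num_tracks : Int) (segment : Int) (num_segments : Int) (out : List String) : Decidable (Spec_get_next_segments segment_types track num_tracks segment num_segments out) := by unfold Spec_get_next_segments; infer_instance

-- ===== CLAIM (what is proved, stated in full; the proofs are below) =====
def Claim_equal_get_next_segments : Prop := ∀ (segment_types : List String) (track : Int) (num_tracks : Int) (segment : Int) (num_segments : Int), Dom_get_next_segments segment_types track num_tracks segment num_segments → Pre_get_next_segments segment_types track num_tracks segment num_segments → Spec_get_next_segments segment_types track num_tracks segment num_segments (get_next_segments segment_types track num_tracks segment num_segments)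

-- ===== LEMMAS AND PROOFS =====
lemma pv_filter_pyRange_interval (p : Int → Bool) (lo hi : Int)
    (hp : ∀ x : Int, p x = true ↔ (lo ≤ x ∧ x ≤ hi)) :
    ∀ (n : Nat) (a b : Int), (b - a).toNat = n →
      (PySem.List.pyRange a b 1).filter p = PySem.List.pyRange (max a lo) (min b (hi + 1)) 1 := by
  intro n
  induction n with
  | zero =>
    intro a b h
    rw [PySem.List.pyRange_one_eq_nil (by omega), PySem.List.pyRange_one_eq_nil (by omega)]
    rfl
  | succ k ih =>
    intro a b h
    rw [PySem.List.pyRange_one_cons (by omega), List.filter_cons]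
    by_cases hm : lo ≤ a ∧ a ≤ hi
    · rw [(hp a).mpr hm]
      simp only [if_true]
      rw [ih (a + 1) b (by omega)]
      have h1 : max a lo = a := by omega
      have h2 : max (a + 1) lo = a + 1 := by omega
      have hcons : PySem.List.pyRange a (min b (hi + 1)) 1
          = a :: PySem.List.pyRange (a + 1) (min b (hi + 1)) 1 :=
        PySem.List.pyRange_one_cons (by omega)
      rw [h2, h1, hcons]
    · have hpa : p a = false := by
        cases hq : p a
        · rfl
        · exact absurd ((hp a).mp hq) hm
      rw [hpa]
      simp only [Bool.false_eq_true, if_false]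
      rw [ih (a + 1) b (by omega)]
      by_cases hlo : a < lo
      · congr 1
        omega
      · rw [PySem.List.pyRange_one_eq_nil (by omega), PySem.List.pyRange_one_eq_nil (by omega)]

lemma pv_foldl_interval (lo hi a b : Int) (f : Int → String) (init : List String) :
    (PySem.List.pyRange a b 1).foldl
      (fun acc x => if lo ≤ x ∧ x ≤ hi then acc ++ [f x] else acc) init
    = init ++ (PySem.List.pyRange (max a lo) (min b (hi + 1)) 1).map f := by
  rw [PySem.List.foldl_append_ite]
  rw [pv_filter_pyRange_interval _ lo hi (by intro x; simp) _ a b rfl]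

-- ===== VERDICT (by name: the statement is the Claim_ definition above) =====
theorem get_next_segments_spec : Claim_equal_get_next_segments := by
  intro segment_types track num_tracks segment num_segments _ _
  unfold Spec_get_next_segments get_next_segments get_next_segments_alt
  dsimp only
  set s := PySem.List.pyGetD segment_types segment "" with hs
  set j := PySem.Int.mod (segment + 1) num_segments with hj
  set ns := PySem.List.pyGetD segment_types j "" with hns
  set f : Int → String := fun t => "segment-" ++ PySem.Int.toStr t ++ "-" ++ PySem.Int.toStr j with hf
  by_cases h1 : ns = "bottleneck"
  · -- bottleneck next segment: A keeps only next_track = 1; B returns the singleton directly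
    simp only [h1, String.reduceEq, if_true, if_false, reduceIte]
    have hbody : (fun (acc : List String) (x : Int) => if x ≠ 1 then acc else acc ++ [f x])
        = (fun (acc : List String) (x : Int) => if (1:Int) ≤ x ∧ x ≤ 1 then acc ++ [f x] else acc) := by
      funext acc x
      by_cases hx : x = 1
      · subst hx; simp
      · rw [if_pos hx, if_neg (by omega)]
    rw [hbody, pv_foldl_interval]
    by_cases hn : num_tracks ≥ 1
    · rw [if_pos hn]
      have e2 : min (num_tracks + 1) (1 + 1) = 1 + 1 := by omega
      rw [e2, show max (1:Int) 1 = 1 by omega, PySem.List.pyRange_one_singleton]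
      have hone : ("segment-" ++ PySem.Int.toStr (1:Int) ++ "-" : String) = "segment-1-" := by decide
      simp only [List.map_cons, List.map_nil, List.nil_append, hf]
      rw [hone]
    · rw [if_neg hn, PySem.List.pyRange_one_eq_nil (by omega)]
      rfl
  · by_cases h2 : ns = "wall-divided"
    · -- wall-divided next segment
      simp only [h1, h2, String.reduceEq, if_true, if_false, reduceIte, true_and]
      by_cases h3 : s = "wall-divided"
      · -- stay on the same track
        simp only [h3, String.reduceEq, reduceIte, if_true]
        have hbody : (fun (acc : List String) (x : Int) =>
            if track = x then acc ++ ["segment-" ++ PySem.Int.toStr track ++ "-" ++ PySem.Int.toStr j] else acc)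
            = (fun (acc : List String) (x : Int) =>
                if track ≤ x ∧ x ≤ track then acc ++ [(fun _ => f track) x] else acc) := by
          funext acc x
          by_cases hx : track = x
          · subst hx; simp [hf]
          · rw [if_neg hx, if_neg (by omega)]
        rw [hbody, pv_foldl_interval]
        by_cases ht : 1 ≤ track ∧ track ≤ num_tracks
        · rw [if_pos ht, show max 1 track = track by omega,
              show min (num_tracks + 1) (track + 1) = track + 1 by omega,
              PySem.List.pyRange_one_singleton]
          simp [hf]
        · rw [if_neg ht, PySem.List.pyRange_one_eq_nil (by omega)]
          rfl
      · -- into a wall-divided segment from elsewhere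
        simp only [h3, String.reduceEq, reduceIte, if_false, and_false, false_and]
        by_cases h4 : s = "bottleneck"
        · -- from a bottleneck: any track
          simp only [h4, String.reduceEq, reduceIte, or_true, not_true, and_false, if_false, or_false]
          rw [show (fun (segments : List String) (next_track : Int) =>
                segments ++ ["segment-" ++ PySem.Int.toStr next_track ++ "-" ++ PySem.Int.toStr j])
              = (fun (acc : List String) (x : Int) => acc ++ [f x]) from rfl,
            PySem.List.foldl_append_singleton_eq_map, List.nil_append]
        · -- adjacent tracks only
          simp only [h4, String.reduceEq, reduceIte, or_false, false_or, true_or, or_true,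
            not_false_iff, and_true, true_and, if_true]
          have hbody : (fun (acc : List String) (x : Int) =>
              if |track - x| ≤ 1 then acc ++ [f x] else acc)
              = (fun (acc : List String) (x : Int) =>
                  if track - 1 ≤ x ∧ x ≤ track + 1 then acc ++ [f x] else acc) := by
            funext acc x
            by_cases hx : track - 1 ≤ x ∧ x ≤ track + 1
            · rw [if_pos hx, if_pos (by rw [abs_le]; omega)]
            · rw [if_neg hx, if_neg (by rw [abs_le]; omega)]
          rw [hbody, pv_foldl_interval, List.nil_append,
              show min (num_tracks + 1) (track + 1 + 1) = min num_tracks (track + 1) + 1 by omega]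
    · -- ordinary next segment (possibly start-goal: both sides bump the track count the same way)
      simp only [h1, h2, String.reduceEq, if_true, if_false, reduceIte, false_and, and_false]
      set N := if ns = "start-goal" then num_tracks + 1 else num_tracks with hN
      by_cases h3 : s = "wall-divided"
      · -- after a wall-divided segment: adjacent tracks only
        simp only [h3, String.reduceEq, true_or, if_true]
        have hbody : (fun (acc : List String) (x : Int) =>
            if |track - x| ≤ 1 then acc ++ [f x] else acc)
            = (fun (acc : List String) (x : Int) =>
                if track - 1 ≤ x ∧ x ≤ track + 1 then acc ++ [f x] else acc) := by
          funext acc x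
          by_cases hx : track - 1 ≤ x ∧ x ≤ track + 1
          · rw [if_pos hx, if_pos (by rw [abs_le]; omega)]
          · rw [if_neg hx, if_neg (by rw [abs_le]; omega)]
        rw [hbody, pv_foldl_interval, List.nil_append,
            show min (N + 1) (track + 1 + 1) = min N (track + 1) + 1 by omega]
      · -- default: any track
        simp only [h3, false_or, if_false]
        rw [PySem.List.foldl_append_singleton_eq_map, List.nil_append]
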